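-- pv_equiv track=rewrite | github.com/BuiKhanh2007/python | De_Thi_Python/Day_So_Nguyen_To/test.py | daysohanhphuc
-- ===== SOURCE A (Python) =====
-- def daysohanhphuc(n):
-- 	khanh = ''
-- 	if 0<n<=10000 and n == int(n):
-- 		for i in range(n,0,-1):
-- 			check=True
-- 			for j in range(2,i):
-- 				if i%j==0:
-- 					check=False
-- 					break
-- 			if check:
-- 				khanh+='_'+str(i)
-- 	return khanh[1:]
-- ===== SOURCE B (Python) =====
-- def daysohanhphuc(n):
--     if not (0 < n <= 10000 and n == int(n)):
--         return ''
--     comp = [False] * (n + 1)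
--     for p in range(2, n + 1):
--         for m in range(2 * p, n + 1, p):
--             comp[m] = True
--     return '_'.join(str(i) for i in range(n, 0, -1) if not comp[i])
-- ===== Notes on version B (the rewrite author's own statement) =====
-- stated objective: faster
-- what changed: Replaced per-number trial division over range(2,i) by a single Sieve of Eratosthenes marking pass, then one join over the unmarked numbers in descending order.
import Mathlib
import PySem

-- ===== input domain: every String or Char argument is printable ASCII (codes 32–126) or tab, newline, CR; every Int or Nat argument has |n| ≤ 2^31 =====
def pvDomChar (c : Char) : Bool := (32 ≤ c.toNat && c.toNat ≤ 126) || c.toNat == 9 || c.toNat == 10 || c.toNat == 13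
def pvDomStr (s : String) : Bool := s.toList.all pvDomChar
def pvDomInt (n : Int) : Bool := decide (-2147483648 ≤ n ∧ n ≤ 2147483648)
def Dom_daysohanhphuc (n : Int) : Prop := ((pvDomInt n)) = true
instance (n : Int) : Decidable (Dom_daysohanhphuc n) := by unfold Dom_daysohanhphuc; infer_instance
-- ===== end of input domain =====

-- B replaces A's per-number trial division by one Sieve of Eratosthenes marking pass (faster).

-- ===== PORT A =====
-- 'n == int(n)' is identically true for an int argument and is dropped from the guard.
-- The inner 'for j in range(2,i)' with break is folded without early exit: once check
-- is False it stays False, so the final value is identical.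
def daysohanhphuc (n : Int) : String :=
  let khanh : String := ""
  let khanh :=
    if 0 < n ∧ n ≤ 10000 then
      (PySem.List.pyRange n 0 (-1)).foldl (fun kh i =>
        let check := (PySem.List.pyRange 2 i 1).foldl
          (fun ch j => if PySem.Int.mod i j == 0 then false else ch) true
        if check then kh ++ "_" ++ PySem.Int.toStr i else kh) khanh
    else khanh
  PySem.Str.slice khanh (some 1) none

-- ===== PORT B =====
-- 'comp[m] = True': m is always a valid nonnegative index here, so List.set is exact.
def daysohanhphuc_alt (n : Int) : String :=
  if ¬ (0 < n ∧ n ≤ 10000) then ""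
  else
    let comp : List Bool := List.replicate (n + 1).toNat false
    let comp := (PySem.List.pyRange 2 (n + 1) 1).foldl (fun c p =>
      (PySem.List.pyRange (2 * p) (n + 1) p).foldl
        (fun c m => c.set m.toNat true) c) comp
    PySem.Str.join "_"
      (((PySem.List.pyRange n 0 (-1)).filter
        (fun i => !(PySem.List.pyGetD comp i false))).map PySem.Int.toStr)

-- ===== PRECONDITION & SPEC =====
def Spec_daysohanhphuc (n : Int) (out : String) : Prop := out = daysohanhphuc_alt n
instance (n : Int) (out : String) : Decidable (Spec_daysohanhphuc n out) := by unfold Spec_daysohanhphuc; infer_instance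

-- ===== CLAIM (what is proved, stated in full; the proofs are below) =====
def Claim_equal_daysohanhphuc : Prop := ∀ (n : Int), Dom_daysohanhphuc n → Spec_daysohanhphuc n (daysohanhphuc n)

-- ===== LEMMAS AND PROOFS =====

-- A's inner loop: the accumulator stays false once false, so the fold is b && !any.
theorem pv_foldl_check (f : Int → Bool) (l : List Int) (b : Bool) :
    l.foldl (fun ch j => if f j then false else ch) b = (b && !l.any f) := by
  induction l generalizing b with
  | nil => simp
  | cons x xs ih =>
    rw [List.foldl_cons, List.any_cons]
    by_cases h : f x
    · rw [if_pos h, ih, h]; simp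
    · rw [if_neg h, ih]; simp [h]

-- marking pass over one flat list of indices
theorem pv_foldl_set_getD (ms : List Int) (c : List Bool) (i : Nat) (hi : i < c.length) :
    (ms.foldl (fun c m => c.set m.toNat true) c).getD i false =
      (c.getD i false || ms.any (fun m => m.toNat == i)) := by
  induction ms generalizing c with
  | nil => simp
  | cons m ms ih =>
    rw [List.foldl_cons, List.any_cons]
    rw [ih _ (by simpa using hi)]
    have hset : (c.set m.toNat true).getD i false =
        (c.getD i false || (m.toNat == i)) := by
      by_cases h : m.toNat = i
      · subst h
        simp [List.getD, hi]
      · simp [List.getD, List.getElem?_set_ne h, h]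
    rw [hset]
    simp [Bool.or_assoc]

-- nested fold over ranges = single fold over the flattened list
theorem pv_foldl_foldl_flat {α β : Type} (ps : List α) (g : α → List β)
    (h : List Bool → β → List Bool) (c : List Bool) :
    ps.foldl (fun c p => (g p).foldl h c) c = (ps.flatMap g).foldl h c := by
  induction ps generalizing c with
  | nil => simp
  | cons p ps ih => simp [List.foldl_append, ih]

-- the trial-division condition is the sieve condition (for 1 ≤ i)
theorem pv_div_iff (i : Int) (hi : 1 ≤ i) :
    (∃ j, 2 ≤ j ∧ j < i ∧ j ∣ i) ↔ (∃ p, 2 ≤ p ∧ 2 * p ≤ i ∧ p ∣ i) := by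
  constructor
  · rintro ⟨j, h2, hlt, hdvd⟩
    obtain ⟨q, rfl⟩ := hdvd
    refine ⟨j, h2, ?_, ⟨q, rfl⟩⟩
    have hq : 2 ≤ q := by nlinarith
    nlinarith
  · rintro ⟨p, h2, hle, hdvd⟩
    exact ⟨p, h2, by omega, hdvd⟩

-- string accumulation: A's fold appends '_' ++ str(i) for each kept i
theorem pv_foldl_str (l : List Int) (c : Int → Bool) (acc : String) :
    (l.foldl (fun kh i => if c i then kh ++ "_" ++ PySem.Int.toStr i else kh) acc).toList
      = acc.toList ++ ((l.filter c).map PySem.Int.toStr).flatMap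
          (fun s => '_' :: s.toList) := by
  induction l generalizing acc with
  | nil => simp
  | cons x xs ih =>
    by_cases h : c x
    · simp [h, ih, List.append_assoc]
    · simp [h, ih]

-- join with '_' of a nonempty list of pieces
theorem pv_join_cons (ps : List (List Char)) (p : List Char) :
    PySem.Chars.join ['_'] (p :: ps) = p ++ ps.flatMap (fun q => '_' :: q) := by
  induction ps generalizing p with
  | nil => simp [PySem.Chars.join_singleton]
  | cons q qs ih =>
    rw [PySem.Chars.join_cons_cons, ih q]
    simp

-- the two per-element conditions agree on 1 ≤ i ≤ n (n ≤ 10000 not needed)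
theorem pv_cond_eq (n i : Int) (hn : 0 < n) (h1 : 1 ≤ i) (h2 : i ≤ n) :
    ((PySem.List.pyRange 2 i 1).foldl
        (fun ch j => if PySem.Int.mod i j == 0 then false else ch) true)
      = !(PySem.List.pyGetD
          ((PySem.List.pyRange 2 (n + 1) 1).foldl (fun c p =>
            (PySem.List.pyRange (2 * p) (n + 1) p).foldl
              (fun c m => c.set m.toNat true) c)
            (List.replicate (n + 1).toNat false)) i false) := by
  rw [pv_foldl_check, pv_foldl_foldl_flat,
      PySem.List.pyGetD_of_nonneg _ _ (by omega : (0:Int) ≤ i)]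
  have hlen : i.toNat < (List.replicate (n + 1).toNat false).length := by
    rw [List.length_replicate]; omega
  rw [pv_foldl_set_getD
        ((PySem.List.pyRange 2 (n + 1) 1).flatMap (fun p => PySem.List.pyRange (2 * p) (n + 1) p))
        (List.replicate (n + 1).toNat false) i.toNat hlen]
  rw [Bool.true_and, List.getD_replicate, Bool.false_or]
  have hkey : ((PySem.List.pyRange 2 i 1).any (fun j => PySem.Int.mod i j == 0))
      = ((List.flatMap (fun p => PySem.List.pyRange (2 * p) (n + 1) p)
            (PySem.List.pyRange 2 (n + 1) 1)).any (fun m => m.toNat == i.toNat)) := by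
    rw [Bool.eq_iff_iff]
    simp only [List.any_eq_true, List.mem_flatMap]
    constructor
    · rintro ⟨j, hj, hmod⟩
      rw [PySem.List.mem_pyRange_one] at hj
      rw [beq_iff_eq, PySem.Int.mod_eq_zero_iff_dvd] at hmod
      obtain ⟨p, hp2, hple, hpdvd⟩ := (pv_div_iff i h1).mp ⟨j, hj.1, hj.2, hmod⟩
      refine ⟨i, ⟨p, ?_, ?_⟩, by simp⟩
      · rw [PySem.List.mem_pyRange_one]; omega
      · rw [PySem.List.mem_pyRange_iff_of_pos (by omega : (0:Int) < p)]
        refine ⟨by omega, by omega, dvd_sub hpdvd ⟨2, by ring⟩⟩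
    · rintro ⟨m, ⟨p, hp, hm⟩, hbeq⟩
      rw [PySem.List.mem_pyRange_one] at hp
      rw [PySem.List.mem_pyRange_iff_of_pos (by omega : (0:Int) < p)] at hm
      have hm0 : (0:Int) ≤ m := by omega
      have hmi : m = i := by
        have := beq_iff_eq.mp hbeq
        omega
      subst hmi
      have hdvd : p ∣ m := by
        have h' : p ∣ (m - 2 * p) + 2 * p := dvd_add hm.2.2 ⟨2, by ring⟩
        simpa using h'
      obtain ⟨j, hj2, hjlt, hjdvd⟩ := (pv_div_iff m h1).mpr ⟨p, hp.1, hm.1, hdvd⟩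
      refine ⟨j, ?_, by rw [beq_iff_eq, PySem.Int.mod_eq_zero_iff_dvd]; exact hjdvd⟩
      rw [PySem.List.mem_pyRange_one]; omega
  rw [hkey]
  omega

-- ===== VERDICT (by name: the statement is the Claim_ definition above) =====
theorem daysohanhphuc_spec : Claim_equal_daysohanhphuc := by
  intro n _
  simp only [Spec_daysohanhphuc, daysohanhphuc, daysohanhphuc_alt]
  by_cases hg : 0 < n ∧ n ≤ 10000
  · rw [if_pos hg, if_neg (not_not_intro hg)]
    apply String.toList_inj.mp
    rw [PySem.Str.toList_slice]
    rw [PySem.Chars.slice_eq_listSlice, PySem.List.slice_from_one, pv_foldl_str]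
    have hfilter :
        (PySem.List.pyRange n 0 (-1)).filter (fun i =>
          (PySem.List.pyRange 2 i 1).foldl
            (fun ch j => if PySem.Int.mod i j == 0 then false else ch) true)
        = (PySem.List.pyRange n 0 (-1)).filter (fun i =>
            !(PySem.List.pyGetD
              ((PySem.List.pyRange 2 (n + 1) 1).foldl (fun c p =>
                (PySem.List.pyRange (2 * p) (n + 1) p).foldl
                  (fun c m => c.set m.toNat true) c)
                (List.replicate (n + 1).toNat false)) i false)) := by
      apply List.filter_congr
      intro i hi
      rw [PySem.List.mem_pyRange_neg_one] at hi
      exact pv_cond_eq n i hg.1 (by omega) hi.2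
    rw [hfilter, PySem.Str.toList_join]
    generalize ((PySem.List.pyRange n 0 (-1)).filter _) = L
    have hsep : ("_" : String).toList = ['_'] := by decide
    rw [hsep]
    cases L with
    | nil => decide
    | cons x xs =>
      simp only [List.map_map, List.map_cons]
      rw [pv_join_cons]
      simp [List.flatMap_map, Function.comp]
  · rw [if_neg hg, if_pos hg]
    apply String.toList_inj.mp
    rw [PySem.Str.toList_slice, PySem.Chars.slice_eq_listSlice, PySem.List.slice_from_one]
    rfl
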